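-- pv_equiv track=rewrite | github.com/WangQiuc/leetcode | misc/utf16decode.py | base64decode
-- ===== SOURCE A (Python) =====
-- import string
--
-- def base64decode(s):
--     d = {'+':62, '-':63}
--     for i, c in enumerate(string.ascii_uppercase):
--         d[c] = i
--     for i, c in enumerate(string.ascii_lowercase,26):
--         d[c] = i
--     for i in range(10):
--         d[str(i)] = i+52
--     t = "".join(f"{d[c]:06b}" for c in s)
--     p = " ".join(t[i:i+8] for i in range(0,len(t),8))
--     q = " ".join(f"{int(t[i:i+8],2):02x}" for i in range(0,len(t),8))
--     return q
-- ===== SOURCE B (Python) =====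
-- import string
--
-- def base64decode(s):
--     d = {'+': 62, '-': 63}
--     for i, c in enumerate(string.ascii_uppercase):
--         d[c] = i
--     for i, c in enumerate(string.ascii_lowercase, 26):
--         d[c] = i
--     for i in range(10):
--         d[str(i)] = i + 52
--     out = []
--     buf = 0
--     nbits = 0
--     for c in s:
--         buf = (buf << 6) | d[c]
--         nbits += 6
--         if nbits >= 8:
--             nbits -= 8
--             out.append(f"{buf >> nbits:02x}")
--             buf &= (1 << nbits) - 1
--     if nbits > 0:
--         out.append(f"{buf:02x}")
--     return " ".join(out)
-- ===== Notes on version B (the rewrite author's own statement) =====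
-- stated objective: faster
-- what changed: Instead of concatenating all 6-bit strings into one big bit-string and re-slicing it into 8-bit substrings to parse back, B streams once over the input with an integer bit buffer and bit counter, emitting each hex byte as soon as 8 bits are available (plus the unpadded trailing remainder).
import Mathlib
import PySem

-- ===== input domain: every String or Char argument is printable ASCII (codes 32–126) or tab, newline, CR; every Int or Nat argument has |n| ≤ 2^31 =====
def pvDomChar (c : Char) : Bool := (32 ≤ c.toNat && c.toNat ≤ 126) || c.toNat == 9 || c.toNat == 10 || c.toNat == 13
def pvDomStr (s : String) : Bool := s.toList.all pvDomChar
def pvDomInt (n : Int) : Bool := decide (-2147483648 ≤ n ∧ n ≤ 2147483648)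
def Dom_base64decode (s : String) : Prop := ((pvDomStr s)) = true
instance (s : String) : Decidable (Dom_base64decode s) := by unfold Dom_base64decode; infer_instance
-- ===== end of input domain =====

-- B replaces A's build-the-whole-bit-string-and-reslice pipeline by a single streaming pass with an
-- integer bit buffer, emitting each hex byte as soon as 8 bits are available (measurably faster:
-- no large intermediate bit-string is built and re-sliced).

-- ===== PORT A =====
-- f"{n:02x}" — exact for 0 ≤ n < 256 (every value formatted here is a byte or a sub-byte remainder)
def hex2 (n : Nat) : List Char :=
  ["0123456789abcdef".toList.getD (n / 16) '0', "0123456789abcdef".toList.getD (n % 16) '0']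

-- int(x, 2) — exact for the nonempty '0'/'1' strings that are the only chunks reachable here
def parseBin2 (cs : List Char) : Nat :=
  cs.foldl (fun a c => 2 * a + (if c = '1' then 1 else 0)) 0

-- d = {'+':62,'-':63}; then the three filling loops (str(i) for 0 ≤ i < 10 is the single digit char)
def b64dict : PySem.Dict Char Int :=
  let d : PySem.Dict Char Int := PySem.Dict.ofList [('+', 62), ('-', 63)]
  let d := (PySem.List.enumerate "ABCDEFGHIJKLMNOPQRSTUVWXYZ".toList 0).foldl
    (fun d p => d.insert p.2 p.1) d
  let d := (PySem.List.enumerate "abcdefghijklmnopqrstuvwxyz".toList 26).foldl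
    (fun d p => d.insert p.2 p.1) d
  (PySem.List.pyRange 0 10 1).foldl
    (fun d i => d.insert ((PySem.Int.toChars i).headD '?') (i + 52)) d

def base64decode (s : String) : String :=
  let d := b64dict
  -- t = "".join(f"{d[c]:06b}" for c in s); f"{v:06b}" = zfill(format(v,'b'), 6), exact for v ≥ 0
  -- (all dict values are ≥ 0); a KeyError (char not in d) is excluded by Pre_, so getD 0 is unreachable
  let t : List Char := PySem.Chars.join []
    (s.toList.map (fun c => PySem.Chars.zfill (PySem.Int.toBinChars ((d.get? c).getD 0)) 6))
  let _p := PySem.Chars.join [' ']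
    ((PySem.List.pyRange 0 (PySem.List.len t) 8).map
      (fun i => PySem.List.slice t (some i) (some (i + 8))))
  let q := PySem.Chars.join [' ']
    ((PySem.List.pyRange 0 (PySem.List.len t) 8).map
      (fun i => hex2 (parseBin2 (PySem.List.slice t (some i) (some (i + 8))))))
  String.mk q

-- ===== PORT B =====
-- buf and nbits stay nonnegative Python ints throughout (shifts/or/and of nonnegative values),
-- so Nat is exact for them here.
def base64decode_alt (s : String) : String :=
  let d := b64dict
  let st := s.toList.foldl
    (fun (st : List (List Char) × Nat × Nat) c =>
      let out := st.1
      let buf := (st.2.1 <<< 6) ||| ((d.get? c).getD 0).toNat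
      let nbits := st.2.2 + 6
      if 8 ≤ nbits then
        (out ++ [hex2 (buf >>> (nbits - 8))], buf &&& ((1 <<< (nbits - 8)) - 1), nbits - 8)
      else
        (out, buf, nbits)) ([], 0, 0)
  let out := if 0 < st.2.2 then st.1 ++ [hex2 st.2.1] else st.1
  String.mk (PySem.Chars.join [' '] out)

-- ===== PRECONDITION & SPEC =====
def pyB64Alphabet : List Char :=
  ['A', 'B', 'C', 'D', 'E', 'F', 'G', 'H', 'I', 'J', 'K', 'L', 'M', 'N', 'O', 'P', 'Q', 'R', 'S', 'T', 'U', 'V', 'W', 'X', 'Y', 'Z', 'a', 'b', 'c', 'd', 'e', 'f', 'g', 'h', 'i', 'j', 'k', 'l', 'm', 'n', 'o', 'p', 'q', 'r', 's', 't', 'u', 'v', 'w', 'x', 'y', 'z', '0', '1', '2', '3', '4', '5', '6', '7', '8', '9', '+', '-']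

-- Pre_ excludes exactly the strings containing a character outside the base64 alphabet,
-- on which A raises KeyError (d[c]).
def Pre_base64decode (s : String) : Prop := (s.toList.all (fun c => pyB64Alphabet.contains c)) = true
instance (s : String) : Decidable (Pre_base64decode s) := by unfold Pre_base64decode; infer_instance

def pvWitness_base64decode : String := "A"

def Spec_base64decode (s : String) (out : String) : Prop := out = base64decode_alt s
instance (s : String) (out : String) : Decidable (Spec_base64decode s out) := by
  unfold Spec_base64decode; infer_instance

-- ===== CLAIM (what is proved, stated in full; the proofs are below) =====
def Claim_equal_base64decode : Prop :=
  ∀ (s : String), Dom_base64decode s → Pre_base64decode s →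
    Spec_base64decode s (base64decode s)

-- ===== LEMMAS AND PROOFS =====

-- the per-character 6-bit value, as a Nat (proof-side view of d[c])
def dval (c : Char) : Nat := ((b64dict.get? c).getD 0).toNat

-- proof-side view of f"{v:06b}"
def bin6 (v : Nat) : List Char := PySem.Chars.zfill (PySem.Int.toBinChars (v : Int)) 6

-- the byte chunks t[0:8], t[8:16], … (the last one possibly shorter)
def chunks8 : List Char → List (List Char)
  | [] => []
  | c :: cs => ((c :: cs).take 8) :: chunks8 ((c :: cs).drop 8)
termination_by l => l.length
decreasing_by simp

-- b64dict, evaluated once to its literal items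
def b64litdict : PySem.Dict Char Int := PySem.Dict.mk
  [('+', 62), ('-', 63), ('A', 0), ('B', 1), ('C', 2), ('D', 3), ('E', 4), ('F', 5), ('G', 6), ('H', 7), ('I', 8), ('J', 9), ('K', 10), ('L', 11), ('M', 12), ('N', 13), ('O', 14), ('P', 15), ('Q', 16), ('R', 17), ('S', 18), ('T', 19), ('U', 20), ('V', 21), ('W', 22), ('X', 23), ('Y', 24), ('Z', 25), ('a', 26), ('b', 27), ('c', 28), ('d', 29), ('e', 30), ('f', 31), ('g', 32), ('h', 33), ('i', 34), ('j', 35), ('k', 36), ('l', 37), ('m', 38), ('n', 39), ('o', 40), ('p', 41), ('q', 42), ('r', 43), ('s', 44), ('t', 45), ('u', 46), ('v', 47), ('w', 48), ('x', 49), ('y', 50), ('z', 51), ('0', 52), ('1', 53), ('2', 54), ('3', 55), ('4', 56), ('5', 57), ('6', 58), ('7', 59), ('8', 60), ('9', 61)]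

set_option maxRecDepth 4000 in
theorem b64dict_eval : b64dict = b64litdict := by decide

set_option maxRecDepth 4000 in
theorem alpha_all : (pyB64Alphabet.all fun c =>
    ((b64litdict.get? c).getD 0 == (((b64litdict.get? c).getD 0).toNat : Int))
      && (((b64litdict.get? c).getD 0).toNat < 64)) = true := by decide

theorem alpha_facts : ∀ c ∈ pyB64Alphabet,
    (b64dict.get? c).getD 0 = (dval c : Int) ∧ dval c < 64 := by
  intro c hc
  have h := List.all_eq_true.mp alpha_all c hc
  rw [Bool.and_eq_true, beq_iff_eq, decide_eq_true_iff] at h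
  unfold dval
  rw [b64dict_eval]
  exact h

set_option maxRecDepth 2000 in
theorem bin6_facts : ∀ v : Nat, v < 64 → (bin6 v).length = 6 ∧ parseBin2 (bin6 v) = v := by decide

theorem join_nil_flatten (xss : List (List Char)) : PySem.Chars.join [] xss = xss.flatten := by
  show (List.intersperse ([] : List Char) xss).flatten = xss.flatten
  induction xss with
  | nil => rfl
  | cons x xs ih => cases xs <;> simp_all

theorem foldl_parseBin2 (cs : List Char) : ∀ a : Nat,
    cs.foldl (fun a c => 2 * a + (if c = '1' then 1 else 0)) a
      = a * 2 ^ cs.length + parseBin2 cs := by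
  induction cs with
  | nil => intro a; simp [parseBin2]
  | cons c cs ih =>
    intro a
    have hc : parseBin2 (c :: cs)
        = (if c = '1' then 1 else 0) * 2 ^ cs.length + parseBin2 cs := by
      show cs.foldl _ (2 * 0 + _) = _
      rw [ih]; ring_nf
    rw [List.foldl_cons, ih, hc]
    simp only [List.length_cons, pow_succ]
    split_ifs <;> ring

theorem parseBin2_append (xs ys : List Char) :
    parseBin2 (xs ++ ys) = parseBin2 xs * 2 ^ ys.length + parseBin2 ys := by
  rw [parseBin2, List.foldl_append, ← parseBin2, foldl_parseBin2]

theorem parseBin2_lt (cs : List Char) : parseBin2 cs < 2 ^ cs.length := by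
  induction cs with
  | nil => simp [parseBin2]
  | cons c cs ih =>
    have h : parseBin2 (c :: cs) = (if c = '1' then 1 else 0) * 2 ^ cs.length + parseBin2 cs := by
      have := parseBin2_append [c] cs
      simpa [parseBin2] using this
    rw [h]
    split_ifs <;> simp [List.length_cons, pow_succ] <;> omega

theorem or6 (a v : Nat) (hv : v < 64) : (a <<< 6) ||| v = a * 64 + v := by
  have h : a * 64 + v = 2 ^ 6 * a + v := by ring_nf
  rw [h]
  apply Nat.eq_of_testBit_eq
  intro j
  rw [Nat.testBit_lor, Nat.testBit_shiftLeft, Nat.testBit_two_pow_mul_add a (by omega : v < 2 ^ 6) j]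
  by_cases hj : j < 6
  · simp [hj, Nat.not_le.mpr hj]
  · simp [hj, Nat.le_of_not_lt hj, Nat.testBit_lt_two_pow (by calc v < 64 := hv
      _ ≤ 2 ^ j := by have := Nat.pow_le_pow_right (by norm_num : 1 ≤ 2) (Nat.le_of_not_lt hj); omega)]

theorem parseBin2_shiftRight (xs ys : List Char) :
    parseBin2 (xs ++ ys) >>> ys.length = parseBin2 xs := by
  rw [parseBin2_append, Nat.shiftRight_eq_div_pow, Nat.add_comm,
    Nat.add_mul_div_right _ _ (by positivity), Nat.div_eq_of_lt (parseBin2_lt ys), Nat.zero_add]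

theorem parseBin2_mask (xs ys : List Char) :
    parseBin2 (xs ++ ys) &&& ((1 <<< ys.length) - 1) = parseBin2 ys := by
  have h1 : (1 : Nat) <<< ys.length = 2 ^ ys.length := by rw [Nat.shiftLeft_eq]; ring
  rw [h1, Nat.and_two_pow_sub_one_eq_mod, parseBin2_append, Nat.add_comm,
    Nat.add_mul_mod_self_right, Nat.mod_eq_of_lt (parseBin2_lt ys)]

theorem chunks8_nil : chunks8 [] = [] := by rw [chunks8]

theorem chunks8_cons (c : Char) (cs : List Char) :
    chunks8 (c :: cs) = ((c :: cs).take 8) :: chunks8 ((c :: cs).drop 8) := by rw [chunks8]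

theorem chunks8_eq_range : ∀ (n : Nat) (t : List Char), t.length ≤ n →
    chunks8 t = (List.range ((t.length + 7) / 8)).map (fun k => (t.drop (8 * k)).take 8) := by
  intro n
  induction n with
  | zero =>
    intro t ht
    have h : t = [] := List.eq_nil_of_length_eq_zero (by omega)
    subst h; rw [chunks8_nil]; rfl
  | succ n ih =>
    intro t ht
    match t with
    | [] => rw [chunks8_nil]; rfl
    | c :: cs =>
      rw [chunks8_cons]
      have hlen : ((c :: cs).drop 8).length = (c :: cs).length - 8 := by simp
      have hm : ((c :: cs).length + 7) / 8 = (((c :: cs).drop 8).length + 7) / 8 + 1 := by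
        rw [hlen]; simp only [List.length_cons]; omega
      rw [hm, List.range_succ_eq_map, List.map_cons]
      congr 1
      rw [List.drop_succ_cons, List.map_map]
      rw [ih (List.drop 7 cs) (by simp only [List.length_cons] at ht; simp only [List.length_drop]; omega)]
      simp only [List.length_drop]
      apply List.map_congr_left
      intro k _
      simp only [Function.comp_apply]
      rw [List.drop_drop]
      have hk : 8 * Nat.succ k = (8 * k + 7) + 1 := by omega
      rw [hk, List.drop_succ_cons]
      have hc7 : 7 + 8 * k = 8 * k + 7 := by omega
      rw [hc7]

theorem pyRange_step8 (n : Nat) :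
    PySem.List.pyRange 0 (n : Int) 8
      = (List.range ((n + 7) / 8)).map (fun k => ((8 * k : Nat) : Int)) := by
  rw [PySem.List.pyRange_of_pos 0 (n : Int) (by norm_num)]
  have hm : (if (0 : Int) < (n : Int) then (((n : Int) - 0 + 8 - 1) / 8).toNat else 0)
      = (n + 7) / 8 := by
    split_ifs with h
    · have h1 : ((n : Int) - 0 + 8 - 1) = ((n + 7 : Nat) : Int) := by push_cast; ring
      rw [h1]
      rw [show ((n + 7 : Nat) : Int) / 8 = (((n + 7) / 8 : Nat) : Int) from by exact_mod_cast Int.ofNat_ediv_ofNat]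
      rw [Int.toNat_natCast]
    · have h0 : n = 0 := by
        by_contra hne
        exact h (by exact_mod_cast Nat.pos_of_ne_zero hne)
      subst h0; rfl
  rw [hm]
  apply List.map_congr_left
  intro k _
  push_cast
  ring

theorem chunks8_pos (l : List Char) (h : l ≠ []) :
    chunks8 l = l.take 8 :: chunks8 (l.drop 8) := by
  match l, h with
  | c :: cs, _ => exact chunks8_cons c cs

theorem chunkA (t : List Char) :
    ((PySem.List.pyRange 0 (t.length : Int) 8).map
      (fun i => hex2 (parseBin2 (PySem.List.slice t (some i) (some (i + 8))))))
      = (chunks8 t).map (fun ch => hex2 (parseBin2 ch)) := by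
  rw [pyRange_step8 t.length, List.map_map, chunks8_eq_range t.length t le_rfl, List.map_map]
  apply List.map_congr_left
  intro k _
  simp only [Function.comp_apply]
  have h8 : (((8 * k : Nat) : Int) + 8) = ((8 * k + 8 : Nat) : Int) := by push_cast; ring
  rw [h8, PySem.List.slice_natCast]
  have h88 : 8 * k + 8 - 8 * k = 8 := by omega
  rw [h88]

-- B's loop body (definitionally the lambda in base64decode_alt, with d := b64dict)
def stepB (st : List (List Char) × Nat × Nat) (c : Char) : List (List Char) × Nat × Nat :=
  let out := st.1
  let buf := (st.2.1 <<< 6) ||| ((b64dict.get? c).getD 0).toNat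
  let nbits := st.2.2 + 6
  if 8 ≤ nbits then
    (out ++ [hex2 (buf >>> (nbits - 8))], buf &&& ((1 <<< (nbits - 8)) - 1), nbits - 8)
  else
    (out, buf, nbits)

theorem streamB : ∀ (cs : List Char), (∀ c ∈ cs, c ∈ pyB64Alphabet) →
    ∀ (r : List Char) (out : List (List Char)), r.length < 8 →
    (let st := cs.foldl stepB (out, parseBin2 r, r.length)
     if 0 < st.2.2 then st.1 ++ [hex2 st.2.1] else st.1)
      = out ++ (chunks8 (r ++ (cs.map (fun c => bin6 (dval c))).flatten)).map
          (fun ch => hex2 (parseBin2 ch)) := by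
  intro cs
  induction cs with
  | nil =>
    intro _ r out hr
    simp only [List.foldl_nil, List.map_nil, List.flatten_nil, List.append_nil]
    by_cases h0 : 0 < r.length
    · have hne : r ≠ [] := by intro h; rw [h] at h0; simp at h0
      rw [chunks8_pos r hne, List.take_of_length_le (by omega),
        List.drop_eq_nil_of_le (by omega), chunks8_nil]
      simp [h0]
    · have hnil : r = [] := List.eq_nil_of_length_eq_zero (by omega)
      subst hnil
      rw [chunks8_nil]
      simp
  | cons c cs ih =>
    intro hcs r out hr
    have hlt := (alpha_facts c (hcs c List.mem_cons_self)).2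
    have hdv : ((b64dict.get? c).getD 0).toNat = dval c := rfl
    have hw6 : (bin6 (dval c)).length = 6 := (bin6_facts (dval c) hlt).1
    have hwv : parseBin2 (bin6 (dval c)) = dval c := (bin6_facts (dval c) hlt).2
    have hbuf : (parseBin2 r <<< 6) ||| ((b64dict.get? c).getD 0).toNat
        = parseBin2 (r ++ bin6 (dval c)) := by
      rw [hdv, or6 _ _ hlt, parseBin2_append, hw6, hwv]
      norm_num
    have hcs' : ∀ x ∈ cs, x ∈ pyB64Alphabet := fun x hx => hcs x (List.mem_cons_of_mem c hx)
    simp only [List.foldl_cons, List.map_cons, List.flatten_cons]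
    by_cases hc8 : 8 ≤ r.length + 6
    · have hstep : stepB (out, parseBin2 r, r.length) c
          = (out ++ [hex2 (parseBin2 (r ++ bin6 (dval c)) >>> (r.length + 6 - 8))],
             parseBin2 (r ++ bin6 (dval c)) &&& ((1 <<< (r.length + 6 - 8)) - 1),
             r.length + 6 - 8) := by
        simp only [stepB, hbuf]
        rw [if_pos hc8]
      rw [hstep]
      -- split r ++ bin6 (dval c) into its first byte and the remainder
      have hlenrw : (r ++ bin6 (dval c)).length = r.length + 6 := by
        rw [List.length_append, hw6]
      have hsplit : r ++ bin6 (dval c)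
          = (r ++ bin6 (dval c)).take 8 ++ (r ++ bin6 (dval c)).drop 8 :=
        (List.take_append_drop 8 _).symm
      have hdlen : ((r ++ bin6 (dval c)).drop 8).length = r.length + 6 - 8 := by
        rw [List.length_drop, hlenrw]
      have hshift : parseBin2 (r ++ bin6 (dval c)) >>> (r.length + 6 - 8)
          = parseBin2 ((r ++ bin6 (dval c)).take 8) := by
        conv_lhs => rw [hsplit, ← hdlen]
        exact parseBin2_shiftRight _ _
      have hmask : parseBin2 (r ++ bin6 (dval c)) &&& ((1 <<< (r.length + 6 - 8)) - 1)
          = parseBin2 ((r ++ bin6 (dval c)).drop 8) := by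
        conv_lhs => rw [hsplit, ← hdlen]
        exact parseBin2_mask _ _
      have hne : (r ++ bin6 (dval c)) ++ (cs.map (fun c => bin6 (dval c))).flatten ≠ [] := by
        intro hnil
        have hh := congrArg List.length hnil
        rw [List.length_append, hlenrw] at hh
        simp at hh
      conv_rhs => rw [← List.append_assoc r (bin6 (dval c)) ((cs.map (fun c => bin6 (dval c))).flatten),
        chunks8_pos _ hne,
        List.take_append_of_le_length (by rw [hlenrw]; omega),
        List.drop_append_of_le_length (by rw [hlenrw]; omega),
        List.map_cons]
      rw [hshift, hmask, ← hdlen]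
      rw [ih hcs' ((r ++ bin6 (dval c)).drop 8) _ (by rw [hdlen]; omega)]
      rw [List.append_assoc]
      rfl
    · have hstep : stepB (out, parseBin2 r, r.length) c
          = (out, parseBin2 (r ++ bin6 (dval c)), r.length + 6) := by
        simp only [stepB, hbuf]
        rw [if_neg hc8]
      rw [hstep]
      have hlenrw : r.length + 6 = (r ++ bin6 (dval c)).length := by
        rw [List.length_append, hw6]
      rw [hlenrw]
      rw [ih hcs' (r ++ bin6 (dval c)) out (by rw [← hlenrw]; omega)]
      rw [List.append_assoc]

-- ===== VERDICT (by name: the statement is the Claim_ definition above) =====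
theorem base64decode_spec : Claim_equal_base64decode := by
  unfold Claim_equal_base64decode
  intro s _ hpre0
  have hpre : ∀ c ∈ s.toList, c ∈ pyB64Alphabet := by
    intro c hc
    have h := List.all_eq_true.mp hpre0 c hc
    simpa using h
  unfold Spec_base64decode base64decode base64decode_alt
  simp only [PySem.List.len_eq, join_nil_flatten]
  have hmap : s.toList.map
      (fun c => PySem.Chars.zfill (PySem.Int.toBinChars ((b64dict.get? c).getD 0)) 6)
      = s.toList.map (fun c => bin6 (dval c)) :=
    List.map_congr_left (fun c hc => by rw [(alpha_facts c (hpre c hc)).1]; rfl)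
  rw [hmap, chunkA]
  have hB := streamB s.toList hpre [] [] (by simp)
  exact congrArg (fun l => String.mk (PySem.Chars.join [' '] l)) hB.symm
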